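-- pv_equiv track=rewrite | github.com/feperessim/puzzle_8 | bfs/Python/puzzle_8_bfs.py | has_solution
-- ===== SOURCE A (Python) =====
-- def has_solution(bo):
--     count = 0
--     board = sum(bo, [])
--     for a in board:
--         for b in board:
--             if a > b:
--                 count += 1
--     return count % 2 == 0
-- ===== SOURCE B (Python) =====
-- def has_solution(bo):
--     board = sum(bo, [])
--     n = len(board)
--     freq = {}
--     for v in board:
--         freq[v] = freq.get(v, 0) + 1
--     ties = sum(c * c for c in freq.values())
--     return ((n * n - ties) // 2) % 2 == 0
-- ===== Notes on version B (the rewrite author's own statement) =====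
-- stated objective: faster
-- what changed: B replaces A's O(n^2) nested comparison loop by a single frequency-dict pass and the closed form count = (n^2 - sum of squared multiplicities)/2, whose parity it returns.
import Mathlib
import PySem

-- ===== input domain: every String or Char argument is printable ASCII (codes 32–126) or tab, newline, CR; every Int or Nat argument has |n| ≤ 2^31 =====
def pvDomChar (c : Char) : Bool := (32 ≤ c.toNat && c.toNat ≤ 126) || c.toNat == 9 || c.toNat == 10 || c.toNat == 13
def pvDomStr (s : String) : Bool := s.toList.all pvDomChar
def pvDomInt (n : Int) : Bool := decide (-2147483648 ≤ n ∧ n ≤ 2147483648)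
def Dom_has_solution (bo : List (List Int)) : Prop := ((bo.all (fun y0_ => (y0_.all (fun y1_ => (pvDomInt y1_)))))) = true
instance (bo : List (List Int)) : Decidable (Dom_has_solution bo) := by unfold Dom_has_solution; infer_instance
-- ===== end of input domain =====

-- B replaces the O(n^2) nested comparison loop by one frequency pass: the number of
-- ordered pairs a>b equals (n^2 - sum of squared multiplicities)/2, so B builds a
-- frequency dict and uses that closed form (objective: faster, O(n) after flattening).

-- ===== PORT A =====
def has_solution (bo : List (List Int)) : Bool :=
  let board := bo.foldl (fun acc r => acc ++ r) ([] : List Int)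
  let count := board.foldl (fun c a => board.foldl (fun c b => if a > b then c + 1 else c) c) (0 : Int)
  decide (PySem.Int.mod count 2 = 0)

-- ===== PORT B =====
def has_solution_alt (bo : List (List Int)) : Bool :=
  let board := bo.foldl (fun acc r => acc ++ r) ([] : List Int)
  let n : Int := board.length
  let freq := board.foldl (fun d v => d.insert v (d.getD v 0 + 1)) (PySem.Dict.empty : PySem.Dict Int Int)
  let ties := (freq.values.map (fun c => c * c)).sum
  decide (PySem.Int.mod (PySem.Int.floordiv (n * n - ties) 2) 2 = 0)

-- ===== PRECONDITION & SPEC =====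
def Spec_has_solution (bo : List (List Int)) (out : Bool) : Prop := out = has_solution_alt bo
instance (bo : List (List Int)) (out : Bool) : Decidable (Spec_has_solution bo out) := by unfold Spec_has_solution; infer_instance

-- ===== CLAIM (what is proved, stated in full; the proofs are below) =====
def Claim_equal_has_solution : Prop := ∀ (bo : List (List Int)), Dom_has_solution bo → Spec_has_solution bo (has_solution bo)

-- ===== LEMMAS AND PROOFS =====

-- inner loop of A counts the b's below a
theorem pv_inner (l : List Int) (a c : Int) :
    l.foldl (fun c b => if a > b then c + 1 else c) c
      = c + (l.countP (fun b => decide (b < a)) : Int) :=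
  PySem.List.foldl_ite_add_one (fun b => b < a) l c

-- A's double loop as a sum over the board
theorem pv_countA (l : List Int) :
    l.foldl (fun c a => l.foldl (fun c b => if a > b then c + 1 else c) c) (0 : Int)
      = (l.map (fun a => ((l.countP (fun b => decide (b < a))) : Int))).sum := by
  have h : l.foldl (fun c a => l.foldl (fun c b => if a > b then c + 1 else c) c) (0 : Int)
      = l.foldl (fun c a => c + ((l.countP (fun b => decide (b < a))) : Int)) (0 : Int) :=
    PySem.List.foldl_congr_mem _ _ _ _ (fun acc x _ => pv_inner l x acc)
  rw [h, PySem.List.foldl_add]; simp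

-- double sums over two lists commute
theorem pv_swap (l m : List Int) (f : Int → Int → Int) :
    (l.map (fun a => (m.map (fun b => f a b)).sum)).sum
      = (m.map (fun b => (l.map (fun a => f a b)).sum)).sum := by
  induction l with
  | nil => simp
  | cons x t ih =>
      simp only [List.map_cons, List.sum_cons, ih]
      rw [PySem.List.sum_map_add_int (f := fun b => f x b) (g := fun b => (t.map (fun a => f a b)).sum)]

-- countP as a 0/1 sum
theorem pv_countP_sum (l : List Int) (p : Int → Bool) :
    ((l.countP p : Int)) = (l.map (fun b => if p b then (1 : Int) else 0)).sum :=
  (PySem.List.sum_map_ite_one_zero (xs := l) (p := p)).symm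

-- trichotomy, summed over one element
theorem pv_tri (l : List Int) (a : Int) :
    ((l.countP (fun b => decide (b < a)) : Int))
      + ((l.countP (fun b => decide (a < b)) : Int))
      + ((l.count a : Int)) = (l.length : Int) := by
  induction l with
  | nil => simp
  | cons x t ih =>
      simp only [List.countP_cons, List.count_cons, List.length_cons, beq_iff_eq,
        decide_eq_true_eq]
      push_cast
      split_ifs <;> omega

-- the two strict sums are equal (symmetry by swapping the double sum)
theorem pv_sym (l : List Int) :
    (l.map (fun a => ((l.countP (fun b => decide (b < a))) : Int))).sum
      = (l.map (fun a => ((l.countP (fun b => decide (a < b))) : Int))).sum := by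
  have h1 : (l.map (fun a => ((l.countP (fun b => decide (b < a))) : Int))).sum
      = (l.map (fun a => (l.map (fun b => if b < a then (1:Int) else 0)).sum)).sum := by
    simp only [pv_countP_sum, decide_eq_true_eq]
  have h2 : (l.map (fun a => ((l.countP (fun b => decide (a < b))) : Int))).sum
      = (l.map (fun a => (l.map (fun b => if a < b then (1:Int) else 0)).sum)).sum := by
    simp only [pv_countP_sum, decide_eq_true_eq]
  rw [h1, h2, pv_swap l l (fun a b => if b < a then (1:Int) else 0)]

-- the tie total over the board equals the sum of squared multiplicities over distinct values
theorem pv_ties (l : List Int) :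
    (l.map (fun a => ((l.count a) : Int))).sum
      = ((PySem.List.dedup l).map (fun v => ((l.count v : Int)) * ((l.count v : Int)))).sum := by
  classical
  have h1 : (l.map (fun a => ((l.count a) : Int))).sum
      = ∑ m ∈ l.toFinset, l.count m • ((l.count m : Int)) :=
    Finset.sum_list_map_count l (fun a => ((l.count a) : Int))
  have h2 : (PySem.List.dedup l).toFinset = l.toFinset := by
    ext x; simp
  have h3 : ((PySem.List.dedup l).map (fun v => ((l.count v : Int)) * ((l.count v : Int)))).sum
      = ∑ m ∈ l.toFinset, ((l.count m : Int)) * ((l.count m : Int)) := by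
    rw [← List.sum_toFinset _ (PySem.List.nodup_dedup l), h2]
  rw [h1, h3]
  refine Finset.sum_congr rfl (fun m _ => ?_)
  simp

-- main identity: 2 * (number of pairs a>b) = n^2 - sum of squared multiplicities
theorem pv_main (l : List Int) :
    2 * (l.foldl (fun c a => l.foldl (fun c b => if a > b then c + 1 else c) c) (0 : Int))
      = (l.length : Int) * (l.length : Int)
        - ((PySem.List.dedup l).map (fun v => ((l.count v : Int)) * ((l.count v : Int)))).sum := by
  rw [pv_countA, ← pv_ties]
  have hsum : (l.map (fun a => ((l.countP (fun b => decide (b < a))) : Int))).sum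
      + (l.map (fun a => ((l.countP (fun b => decide (a < b))) : Int))).sum
      + (l.map (fun a => ((l.count a) : Int))).sum
      = (l.length : Int) * (l.length : Int) := by
    rw [← PySem.List.sum_map_add_int, ← PySem.List.sum_map_add_int]
    have : (l.map (fun a => ((l.countP (fun b => decide (b < a)) : Int))
        + ((l.countP (fun b => decide (a < b)) : Int)) + ((l.count a : Int)))).sum
        = (l.map (fun _ => (l.length : Int))).sum := by
      exact congrArg _ (List.map_congr_left (fun a _ => pv_tri l a))
    rw [this, PySem.List.sum_map_const_int]
  have hsym := pv_sym l
  omega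

-- B's frequency-dict values are the multiplicities over the deduped board
theorem pv_values (l : List Int) :
    (l.foldl (fun d v => d.insert v (d.getD v 0 + 1)) (PySem.Dict.empty : PySem.Dict Int Int)).values
      = (PySem.List.dedup l).map (fun v => ((l.count v) : Int)) := by
  rw [PySem.Dict.foldl_insert_getD_add_one_eq_counter]
  show ((PySem.Dict.counter l).items.map (·.2)) = _
  rw [PySem.Dict.items_counter]
  simp [Function.comp, PySem.List.dedup_eq_ofList]

-- ===== VERDICT (by name: the statement is the Claim_ definition above) =====
theorem has_solution_spec : Claim_equal_has_solution := by
  intro bo _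
  unfold Spec_has_solution has_solution has_solution_alt
  simp only []
  set l := bo.foldl (fun acc r => acc ++ r) ([] : List Int) with hl
  rw [pv_values]
  have hsq : ((((PySem.List.dedup l).map (fun v => ((l.count v) : Int))).map (fun c => c * c)).sum)
      = ((PySem.List.dedup l).map (fun v => ((l.count v : Int)) * ((l.count v : Int)))).sum := by
    rw [List.map_map]; rfl
  rw [hsq]
  have hmain := pv_main l
  set c := l.foldl (fun c a => l.foldl (fun c b => if a > b then c + 1 else c) c) (0 : Int) with hc
  have : (l.length : Int) * (l.length : Int)
      - ((PySem.List.dedup l).map (fun v => ((l.count v : Int)) * ((l.count v : Int)))).sum = 2 * c := by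
    omega
  rw [this]
  have hfd : PySem.Int.floordiv (2 * c) 2 = c := by
    rw [PySem.Int.floordiv_eq_ediv_of_pos (by norm_num)]
    omega
  rw [hfd]
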